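-- pv_equiv track=rewrite | github.com/marcosgabbardo/IRPF-analyzer | src/irpf_analyzer/core/analyzers/dependent_fraud.py | _is_sequential
-- ===== SOURCE A (Python) =====
-- def _is_sequential(digits: str) -> bool:
--     """Check if digits form a sequential pattern."""
--     if len(digits) < 6:
--         return False
--
--     # Check ascending sequence
--     ascending = all(
--         int(digits[i + 1]) == int(digits[i]) + 1
--         for i in range(5)
--     )
--
--     # Check descending sequence
--     descending = all(
--         int(digits[i + 1]) == int(digits[i]) - 1
--         for i in range(5)
--     )
--
--     return ascending or descending
-- ===== SOURCE B (Python) =====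
-- def _is_sequential(digits: str) -> bool:
--     """Check if digits form a sequential pattern."""
--     if len(digits) < 6:
--         return False
--     nums = [int(c) for c in digits[:6]]
--     ascending = nums == list(range(nums[0], nums[0] + 6))
--     descending = nums == list(range(nums[0], nums[0] - 6, -1))
--     return ascending or descending
-- ===== Notes on version B (the rewrite author's own statement) =====
-- stated objective: simpler
-- what changed: Replaces the two pairwise difference scans over indices with a construct-and-compare decomposition: convert the first six characters once and compare the list against the expected ascending/descending run built with range.
-- outside the precondition, e.g. on _is_sequential('13abcd'): A returns False, B raises ValueError
import Mathlib
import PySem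

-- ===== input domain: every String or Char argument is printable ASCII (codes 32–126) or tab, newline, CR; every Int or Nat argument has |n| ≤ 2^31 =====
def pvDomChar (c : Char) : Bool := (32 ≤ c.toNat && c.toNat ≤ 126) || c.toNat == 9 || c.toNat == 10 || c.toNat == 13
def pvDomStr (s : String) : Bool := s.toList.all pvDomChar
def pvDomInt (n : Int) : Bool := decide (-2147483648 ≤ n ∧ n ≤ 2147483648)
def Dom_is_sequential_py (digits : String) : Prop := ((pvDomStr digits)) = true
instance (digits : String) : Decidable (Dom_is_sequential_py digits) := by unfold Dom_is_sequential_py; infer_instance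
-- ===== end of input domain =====

-- B replaces A's two pairwise-difference scans by converting the first six characters once
-- and comparing the list with the expected ascending/descending run built by range (simpler decomposition).

-- ===== PORT A =====
-- int(digits[i]) : on inputs admitted by Pre_ the index is in range and the char is a digit;
-- outside Pre_ Python may raise, the port defaults to 0 there (never reached under Pre_).
def pvA_at (digits : String) (i : Int) : Int :=
  ((PySem.Str.pyGet? digits i).bind (fun c => PySem.Int.ofChars? [c])).getD 0

def is_sequential_py (digits : String) : Bool :=
  if PySem.Str.len digits < 6 then false
  else
    let ascending := (PySem.List.pyRange 0 5 1).all
      (fun i => pvA_at digits (i + 1) == pvA_at digits i + 1)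
    let descending := (PySem.List.pyRange 0 5 1).all
      (fun i => pvA_at digits (i + 1) == pvA_at digits i - 1)
    ascending || descending

-- ===== PORT B =====
-- nums = [int(c) for c in digits[:6]] (same default-0 convention outside Pre_ as port A)
def pvB_nums (digits : String) : List Int :=
  (PySem.List.slice digits.toList none (some 6)).map
    (fun c => (PySem.Int.ofChars? [c]).getD 0)

def is_sequential_py_alt (digits : String) : Bool :=
  if PySem.Str.len digits < 6 then false
  else
    let nums := pvB_nums digits
    let n0 := (PySem.List.pyGet? nums 0).getD 0
    let ascending := nums == PySem.List.pyRange n0 (n0 + 6) 1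
    let descending := nums == PySem.List.pyRange n0 (n0 - 6) (-1)
    ascending || descending

-- ===== PRECONDITION & SPEC =====
-- Pre_ excludes strings of length ≥ 6 whose first six characters are not all ASCII digits:
-- there A's short-circuiting all() may return False without ever converting the offending
-- character, while B's up-front conversion of all six characters raises ValueError.
def Pre_is_sequential_py (digits : String) : Prop :=
  digits.toList.length < 6 ∨ (digits.toList.take 6).all (fun c => c.isDigit) = true
instance (digits : String) : Decidable (Pre_is_sequential_py digits) := by
  unfold Pre_is_sequential_py; infer_instance

def pvWitness_is_sequential_py : String := "351624"

def Spec_is_sequential_py (digits : String) (out : Bool) : Prop :=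
  out = is_sequential_py_alt digits
instance (digits : String) (out : Bool) : Decidable (Spec_is_sequential_py digits out) := by
  unfold Spec_is_sequential_py; infer_instance

-- ===== CLAIM =====
def Claim_equal_is_sequential_py : Prop :=
  ∀ (digits : String), Dom_is_sequential_py digits → Pre_is_sequential_py digits →
    Spec_is_sequential_py digits (is_sequential_py digits)

-- ===== LEMMAS AND PROOFS =====

theorem pv_key (c0 c1 c2 c3 c4 c5 : Char) (rest : List Char) :
    is_sequential_py (String.ofList (c0 :: c1 :: c2 :: c3 :: c4 :: c5 :: rest)) =
    is_sequential_py_alt (String.ofList (c0 :: c1 :: c2 :: c3 :: c4 :: c5 :: rest)) := by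
  rw [Bool.eq_iff_iff]
  norm_num [is_sequential_py, is_sequential_py_alt, pvA_at, pvB_nums,
    PySem.List.pyRange_one, PySem.List.pyRange_neg_one, PySem.List.slice_to]
  simp only [show (6:Int).toNat = 6 from rfl, List.take_succ_cons, List.take_zero, List.range_succ]
  norm_num [List.range_succ]
  intro _
  have expand : ∀ (P : ℕ → Prop), (∀ x < 5, P x) ↔ (P 0 ∧ P 1 ∧ P 2 ∧ P 3 ∧ P 4) := by
    intro P; constructor
    · intro h
      exact ⟨h 0 (by norm_num), h 1 (by norm_num), h 2 (by norm_num), h 3 (by norm_num),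
        h 4 (by norm_num)⟩
    · rintro ⟨h0, h1, h2, h3, h4⟩ x hx; interval_cases x <;> assumption
  rw [expand, expand]
  norm_num
  generalize (PySem.Int.ofChars? [c0]).getD 0 = v0
  generalize (PySem.Int.ofChars? [c1]).getD 0 = v1
  generalize (PySem.Int.ofChars? [c2]).getD 0 = v2
  generalize (PySem.Int.ofChars? [c3]).getD 0 = v3
  generalize (PySem.Int.ofChars? [c4]).getD 0 = v4
  generalize (PySem.Int.ofChars? [c5]).getD 0 = v5
  omega

-- ===== VERDICT =====
theorem is_sequential_py_spec : Claim_equal_is_sequential_py := by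
  intro digits _ _
  unfold Spec_is_sequential_py
  have hs : digits = String.ofList digits.toList := String.ofList_toList.symm
  rw [hs]
  rcases h : digits.toList with _ | ⟨c0, _ | ⟨c1, _ | ⟨c2, _ | ⟨c3, _ | ⟨c4, _ | ⟨c5, rest⟩⟩⟩⟩⟩⟩ <;>
    first
      | exact pv_key c0 c1 c2 c3 c4 c5 rest
      | norm_num [is_sequential_py, is_sequential_py_alt]
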